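-- pv_equiv track=rewrite | github.com/RazAquato/d1ultra-lightburn-bridge | d1ultra_bridge.py | _split_gcode_words
-- ===== SOURCE A (Python) =====
-- from typing import Optional, Tuple, List
--
-- def _split_gcode_words(line: str) -> List[str]:
--     """Split a G-code line into individual words (G0, X10, Y20, etc.)."""
--     words = []
--     current = ""
--     for ch in line:
--         if ch.isalpha() and current:
--             words.append(current)
--             current = ch
--         else:
--             current += ch
--     if current:
--         words.append(current)
--     return words
-- ===== SOURCE B (Python) =====
-- from typing import List
--
-- def _split_gcode_words(line: str) -> List[str]:
--     """Split a G-code line into individual words (G0, X10, Y20, etc.)."""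
--     out = []
--     i = 0
--     n = len(line)
--     while i < n:
--         j = next((j for j in range(i + 1, n) if line[j].isalpha()), n)
--         out.append(line[i:j])
--         i = j
--     return out
-- ===== Notes on version B (the rewrite author's own statement) =====
-- stated objective: alternative
-- what changed: Replaced the per-character accumulator fold (building each word by repeated string concatenation) with an index-based scan: from each word start, find the index of the next letter and slice the original string between boundaries.
import Mathlib
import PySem

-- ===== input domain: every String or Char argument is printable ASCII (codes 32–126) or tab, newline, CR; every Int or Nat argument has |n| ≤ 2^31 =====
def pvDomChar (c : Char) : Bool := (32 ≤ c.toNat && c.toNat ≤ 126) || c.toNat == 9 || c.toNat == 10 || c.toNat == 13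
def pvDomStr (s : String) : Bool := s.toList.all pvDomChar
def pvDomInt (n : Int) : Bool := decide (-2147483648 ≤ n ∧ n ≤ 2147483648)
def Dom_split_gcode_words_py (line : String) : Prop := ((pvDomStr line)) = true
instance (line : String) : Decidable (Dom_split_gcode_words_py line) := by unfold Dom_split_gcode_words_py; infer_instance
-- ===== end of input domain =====

-- B replaces A's per-character accumulator with an index/slice scan; objective: alternative decomposition (same cost).

-- ===== PORT A =====
-- the for-loop over the characters with state (words, current); 'current' kept as List Char,
-- converted to String exactly where A appends it to 'words'
def pvAux_aLoop : List Char → List String → List Char → List String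
  | [], words, cur => if cur.isEmpty then words else words ++ [String.mk cur]
  | ch :: rest, words, cur =>
    if PySem.Chars.isalpha ch && !cur.isEmpty then
      pvAux_aLoop rest (words ++ [String.mk cur]) [ch]
    else
      pvAux_aLoop rest words (cur ++ [ch])

def split_gcode_words_py (line : String) : List String :=
  pvAux_aLoop line.toList [] []

-- ===== PORT B =====
-- Source B's 'while i < n' loop ported as structural recursion on the remaining suffix line[i:];
-- 'next((j for j in range(i+1,n) if line[j].isalpha()), n)' is findIdx isalpha on the suffix
-- after line[i] (findIdx returns the length when no letter is found, matching the 'n' default);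
-- the slice line[i:j] is take, the new suffix line[j:] is drop (indices here are in range).
def pvAux_bRec : List Char → List String
  | [] => []
  | c :: rest =>
    let k := rest.findIdx (fun ch => PySem.Chars.isalpha ch)
    String.mk (c :: rest.take k) :: pvAux_bRec (rest.drop k)
  termination_by cs => cs.length
  decreasing_by simp

def split_gcode_words_py_alt (line : String) : List String :=
  pvAux_bRec line.toList

-- ===== PRECONDITION & SPEC =====
def Spec_split_gcode_words_py (line : String) (out : List String) : Prop := out = split_gcode_words_py_alt line
instance (line : String) (out : List String) : Decidable (Spec_split_gcode_words_py line out) := by unfold Spec_split_gcode_words_py; infer_instance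

-- ===== CLAIM (what is proved, stated in full; the proofs are below) =====
def Claim_equal_split_gcode_words_py : Prop := ∀ (line : String), Dom_split_gcode_words_py line → Spec_split_gcode_words_py line (split_gcode_words_py line)

-- ===== LEMMAS AND PROOFS =====

@[simp] theorem pvAux_bRec_nil : pvAux_bRec [] = ([] : List String) := by
  rw [pvAux_bRec]

theorem pvAux_bRec_cons (c : Char) (rest : List Char) :
    pvAux_bRec (c :: rest) =
      String.mk (c :: rest.take (rest.findIdx (fun ch => PySem.Chars.isalpha ch)))
        :: pvAux_bRec (rest.drop (rest.findIdx (fun ch => PySem.Chars.isalpha ch))) := by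
  rw [pvAux_bRec]

-- reference form of A's loop once 'current' is non-empty: the words still to be produced
def pvGroups : List Char → List Char → List String
  | [], cur => [String.mk cur]
  | ch :: rest, cur =>
    if PySem.Chars.isalpha ch then String.mk cur :: pvGroups rest [ch]
    else pvGroups rest (cur ++ [ch])

theorem pvAux_aLoop_eq_groups (rest : List Char) :
    ∀ (words : List String) (cur : List Char), cur ≠ [] →
      pvAux_aLoop rest words cur = words ++ pvGroups rest cur := by
  induction rest with
  | nil =>
    intro words cur h
    simp [pvAux_aLoop, pvGroups, h]
  | cons ch rest ih =>
    intro words cur h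
    have hcur : cur.isEmpty = false := by simp [h]
    by_cases ha : PySem.Chars.isalpha ch
    · simp [pvAux_aLoop, pvGroups, ha, hcur, ih _ [ch] (by simp)]
    · simp [pvAux_aLoop, pvGroups, ha, hcur, ih _ (cur ++ [ch]) (by simp)]

theorem pvGroups_eq_bRec (rest : List Char) :
    ∀ (cur : List Char), cur ≠ [] →
      pvGroups rest cur =
        String.mk (cur ++ rest.take (rest.findIdx (fun ch => PySem.Chars.isalpha ch)))
          :: pvAux_bRec (rest.drop (rest.findIdx (fun ch => PySem.Chars.isalpha ch))) := by
  induction rest with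
  | nil =>
    intro cur h
    simp [pvGroups]
  | cons ch rest ih =>
    intro cur h
    by_cases ha : PySem.Chars.isalpha ch
    · simp [pvGroups, ha, List.findIdx_cons, ih [ch] (by simp), pvAux_bRec_cons]
    · have := ih (cur ++ [ch]) (by simp)
      simp [pvGroups, ha, List.findIdx_cons, this]

-- ===== VERDICT (by name: the statement is the Claim_ definition above) =====
theorem split_gcode_words_py_spec : Claim_equal_split_gcode_words_py := by
  intro line _
  unfold Spec_split_gcode_words_py split_gcode_words_py split_gcode_words_py_alt
  cases hcs : line.toList with
  | nil => simp [pvAux_aLoop]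
  | cons c rest =>
    have h1 : pvAux_aLoop (c :: rest) [] [] = pvAux_aLoop rest [] [c] := by
      simp [pvAux_aLoop]
    rw [h1, pvAux_aLoop_eq_groups rest [] [c] (by simp),
        pvGroups_eq_bRec rest [c] (by simp)]
    simp [pvAux_bRec_cons]
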